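-- pv_equiv track=rewrite | github.com/ayushkhandelwal18/ece-core | dsp-codes/2complexRIImp.py | manual_convolution
-- ===== SOURCE A (Python) =====
-- def manual_convolution(x, h):
--     Nx = len(x)
--     Nh = len(h)
--     Ny = Nx + Nh - 1
--     y = [0] * Ny               # output array initialized with zeros
--
--     for n in range(Ny):        # loop over output index
--         total = 0
--         for k in range(Nx):    # loop over input samples
--             if 0 <= n-k < Nh:  # valid index check
--                 total += x[k] * h[n-k]
--         y[n] = total
--     return y
-- ===== SOURCE B (Python) =====
-- def manual_convolution(x, h):
--     # scatter form: each input pair (k, j) contributes x[k]*h[j] to y[k+j]; no bounds guard needed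
--     y = [0] * (len(x) + len(h) - 1)
--     for k in range(len(x)):
--         xk = x[k]
--         for j in range(len(h)):
--             y[k + j] += xk * h[j]
--     return y
-- ===== Notes on version B (the rewrite author's own statement) =====
-- stated objective: alternative
-- what changed: Replaced A's gather convolution (for each output index n, sum guarded contributions x[k]*h[n-k] over all k) with a scatter convolution (allocate the output, then for each input pair (k,j) add x[k]*h[j] to y[k+j] with no validity guard).
import Mathlib
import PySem

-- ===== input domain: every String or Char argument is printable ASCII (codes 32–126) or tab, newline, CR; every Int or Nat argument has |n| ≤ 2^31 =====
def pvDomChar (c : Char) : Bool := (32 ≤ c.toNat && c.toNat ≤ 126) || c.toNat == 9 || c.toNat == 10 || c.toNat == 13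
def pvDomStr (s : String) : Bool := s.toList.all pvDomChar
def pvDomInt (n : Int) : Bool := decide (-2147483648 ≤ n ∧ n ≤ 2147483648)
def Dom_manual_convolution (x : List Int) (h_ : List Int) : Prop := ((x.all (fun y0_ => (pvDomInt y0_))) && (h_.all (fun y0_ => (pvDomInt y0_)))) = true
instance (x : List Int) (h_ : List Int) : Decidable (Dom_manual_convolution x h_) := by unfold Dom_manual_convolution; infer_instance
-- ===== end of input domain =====

-- B replaces A's guarded gather convolution (per output index, sum x[k]*h[n-k] over valid k)
-- with an unguarded scatter convolution (per input pair, add x[k]*h[j] into y[k+j]); same cost, different traversal.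
-- ===== PORT A =====
def manual_convolution (x : List Int) (h_ : List Int) : List Int :=
  let Nx : Int := x.length
  let Nh : Int := h_.length
  let Ny : Int := Nx + Nh - 1
  let y : List Int := List.replicate Ny.toNat 0
  (PySem.List.pyRange 0 Ny 1).foldl (fun y n =>
    let total : Int := (PySem.List.pyRange 0 Nx 1).foldl (fun total k =>
      if 0 ≤ n - k ∧ n - k < Nh then
        total + PySem.List.pyGetD x k 0 * PySem.List.pyGetD h_ (n - k) 0
      else total) 0
    y.set n.toNat total) y

-- ===== PORT B =====
def manual_convolution_alt (x : List Int) (h_ : List Int) : List Int :=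
  let y : List Int := List.replicate ((x.length : Int) + (h_.length : Int) - 1).toNat 0
  (PySem.List.pyRange 0 (x.length : Int) 1).foldl (fun y k =>
    let xk : Int := PySem.List.pyGetD x k 0
    (PySem.List.pyRange 0 (h_.length : Int) 1).foldl (fun y j =>
      y.set (k + j).toNat (PySem.List.pyGetD y (k + j) 0 + xk * PySem.List.pyGetD h_ j 0)) y) y

-- ===== PRECONDITION & SPEC =====
def Spec_manual_convolution (x : List Int) (h_ : List Int) (out : List Int) : Prop := out = manual_convolution_alt x h_
instance (x : List Int) (h_ : List Int) (out : List Int) : Decidable (Spec_manual_convolution x h_ out) := by unfold Spec_manual_convolution; infer_instance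

-- ===== CLAIM (what is proved, stated in full; the proofs are below) =====
def Claim_equal_manual_convolution : Prop := ∀ (x : List Int) (h_ : List Int), Dom_manual_convolution x h_ → Spec_manual_convolution x h_ (manual_convolution x h_)

-- ===== LEMMAS AND PROOFS =====

-- length is preserved by any fold whose step preserves length
theorem pv_length_foldl {α : Type} (f : List Int → α → List Int)
    (hf : ∀ y a, (f y a).length = y.length) :
    ∀ (l : List α) (y : List Int), (l.foldl f y).length = y.length := by
  intro l
  induction l with
  | nil => intro y; rfl
  | cons a t ih => intro y; simp [List.foldl_cons, ih, hf]

-- A's outer loop: setting index n to g n for every n in range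
theorem pv_gather_getElem (g : Int → Int) :
    ∀ (m : Nat) (y : List Int) (i : Nat),
      ((PySem.List.pyRange 0 (m : Int) 1).foldl (fun y n => y.set n.toNat (g n)) y)[i]?
        = if (i : Int) < (m : Int) ∧ i < y.length then some (g i) else y[i]? := by
  intro m
  induction m with
  | zero =>
      intro y i
      rw [Nat.cast_zero, PySem.List.pyRange_one_eq_nil (le_refl (0 : Int))]
      simp
  | succ m ih =>
      intro y i
      have hsplit : PySem.List.pyRange 0 ((m + 1 : Nat) : Int) 1
          = PySem.List.pyRange 0 (m : Int) 1 ++ [(m : Int)] := by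
        push_cast
        exact PySem.List.pyRange_one_succ_right (by positivity)
      rw [hsplit, List.foldl_append]
      simp only [List.foldl_cons, List.foldl_nil]
      rw [List.getElem?_set]
      have hlen : ((PySem.List.pyRange 0 (m : Int) 1).foldl
          (fun y n => y.set n.toNat (g n)) y).length = y.length :=
        pv_length_foldl _ (fun y a => by simp) _ y
      rw [hlen, ih y i]
      by_cases hcase : ((m : Int)).toNat = i
      · rw [if_pos hcase]
        by_cases hl : i < y.length
        · rw [if_pos (by omega), if_pos (by omega)]
          have : (i : Int) = (m : Int) := by omega
          simp [this]
        · rw [if_neg (by omega), if_neg (by omega)]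
          exact (List.getElem?_eq_none (by omega)).symm
      · rw [if_neg hcase]
        split_ifs with h1 h2 h2 <;> first | rfl | omega

-- B's inner loop: adds c j at position k + j for every j in range(m)
theorem pv_scatter_inner (c : Int → Int) (k : Int) (hk : 0 ≤ k) :
    ∀ (m : Nat) (y : List Int) (i : Nat),
      ((PySem.List.pyRange 0 (m : Int) 1).foldl
          (fun y j => y.set (k + j).toNat (PySem.List.pyGetD y (k + j) 0 + c j)) y)[i]?
        = if k ≤ (i : Int) ∧ (i : Int) < k + m then y[i]?.map (· + c ((i : Int) - k)) else y[i]? := by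
  intro m
  induction m with
  | zero =>
      intro y i
      rw [Nat.cast_zero, PySem.List.pyRange_one_eq_nil (le_refl (0 : Int))]
      simp only [List.foldl_nil]
      rw [if_neg (by omega)]
  | succ m ih =>
      intro y i
      have hsplit : PySem.List.pyRange 0 ((m + 1 : Nat) : Int) 1
          = PySem.List.pyRange 0 (m : Int) 1 ++ [(m : Int)] := by
        push_cast
        exact PySem.List.pyRange_one_succ_right (by positivity)
      rw [hsplit, List.foldl_append]
      simp only [List.foldl_cons, List.foldl_nil]
      rw [List.getElem?_set]
      have hlen : ((PySem.List.pyRange 0 (m : Int) 1).foldl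
          (fun y j => y.set (k + j).toNat (PySem.List.pyGetD y (k + j) 0 + c j)) y).length
          = y.length :=
        pv_length_foldl _ (fun y a => by simp) _ y
      by_cases hcase : (k + (m : Int)).toNat = i
      · rw [if_pos hcase, hlen, hcase]
        have him : (i : Int) = k + (m : Int) := by omega
        by_cases hl : i < y.length
        · rw [if_pos hl]
          rcases hy : y[i]? with _ | a
          · exact absurd (List.getElem?_eq_none_iff.mp hy) (by omega)
          · rw [if_pos (by omega)]
            rw [PySem.List.pyGetD_of_nonneg _ _ (by omega),
                List.getD_eq_getElem?_getD, hcase, ih y i, if_neg (by omega), hy]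
            simp only [Option.getD_some, Option.map_some]
            have : (i : Int) - k = (m : Int) := by omega
            rw [this]
        · rw [if_neg hl, if_pos (by omega)]
          rw [List.getElem?_eq_none (by omega)]
          rfl
      · rw [if_neg hcase, ih y i]
        split_ifs with h1 h2 h2 <;> first | rfl | omega

-- the per-index sum of scatter contributions from the first m input samples
def pvSum (c : Int → Int → Int) (Nh : Int) (m : Nat) (i : Int) : Int :=
  ((List.range m).map (fun k => if (k : Int) ≤ i ∧ i - (k : Int) < Nh then c k (i - k) else 0)).sum

-- B's outer loop accumulates pvSum at every index
theorem pv_scatter_outer (c : Int → Int → Int) (Nh : Nat) :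
    ∀ (m : Nat) (y : List Int) (i : Nat),
      (((PySem.List.pyRange 0 (m : Int) 1).foldl (fun y k =>
          (PySem.List.pyRange 0 (Nh : Int) 1).foldl
            (fun y j => y.set (k + j).toNat (PySem.List.pyGetD y (k + j) 0 + c k j)) y) y))[i]?
        = y[i]?.map (· + pvSum c Nh m i) := by
  intro m
  induction m with
  | zero =>
      intro y i
      rw [Nat.cast_zero, PySem.List.pyRange_one_eq_nil (le_refl (0 : Int))]
      simp only [List.foldl_nil, pvSum, List.range_zero]
      cases y[i]? <;> simp
  | succ m ih =>
      intro y i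
      have hsplit : PySem.List.pyRange 0 ((m + 1 : Nat) : Int) 1
          = PySem.List.pyRange 0 (m : Int) 1 ++ [(m : Int)] := by
        push_cast
        exact PySem.List.pyRange_one_succ_right (by positivity)
      rw [hsplit, List.foldl_append]
      simp only [List.foldl_cons, List.foldl_nil]
      rw [pv_scatter_inner (c (m : Int)) (m : Int) (by positivity) Nh _ i, ih y i]
      have hsum : pvSum c Nh (m + 1) (i : Int)
          = pvSum c Nh m (i : Int) +
            (if ((m : Int)) ≤ (i : Int) ∧ (i : Int) - (m : Int) < (Nh : Int)
              then c (m : Int) ((i : Int) - (m : Int)) else 0) := by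
        simp [pvSum, List.range_succ]
      by_cases h1 : ((m : Int)) ≤ (i : Int) ∧ (i : Int) < (m : Int) + (Nh : Int)
      · rw [if_pos h1, hsum, if_pos (by omega)]
        cases y[i]? <;> simp
        ring
      · rw [if_neg h1, hsum, if_neg (by omega)]
        simp

-- A's inner loop (the guarded gather sum) equals the same pvSum
theorem pv_total_eq (c : Int → Int → Int) (Nh : Nat) :
    ∀ (m : Nat) (n : Int),
      ((PySem.List.pyRange 0 (m : Int) 1).foldl
        (fun total k => if 0 ≤ n - k ∧ n - k < (Nh : Int) then total + c k (n - k) else total) 0)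
        = pvSum c Nh m n := by
  intro m
  induction m with
  | zero =>
      intro n
      rw [Nat.cast_zero, PySem.List.pyRange_one_eq_nil (le_refl (0 : Int))]
      simp [pvSum]
  | succ m ih =>
      intro n
      have hsplit : PySem.List.pyRange 0 ((m + 1 : Nat) : Int) 1
          = PySem.List.pyRange 0 (m : Int) 1 ++ [(m : Int)] := by
        push_cast
        exact PySem.List.pyRange_one_succ_right (by positivity)
      rw [hsplit, List.foldl_append]
      simp only [List.foldl_cons, List.foldl_nil]
      rw [ih n]
      have hsum : pvSum c Nh (m + 1) n
          = pvSum c Nh m n +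
            (if ((m : Int)) ≤ n ∧ n - (m : Int) < (Nh : Int)
              then c (m : Int) (n - (m : Int)) else 0) := by
        simp [pvSum, List.range_succ]
      rw [hsum]
      by_cases h1 : 0 ≤ n - (m : Int) ∧ n - (m : Int) < (Nh : Int)
      · rw [if_pos h1, if_pos (by omega)]
      · rw [if_neg h1, if_neg (by omega)]
        ring

-- ===== VERDICT (by name: the statement is the Claim_ definition above) =====
theorem manual_convolution_spec : Claim_equal_manual_convolution := by
  intro x h_ _
  unfold Spec_manual_convolution manual_convolution manual_convolution_alt
  dsimp only
  apply List.ext_getElem?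
  intro i
  have hr : PySem.List.pyRange 0 ((x.length : Int) + (h_.length : Int) - 1) 1
      = PySem.List.pyRange 0 (((((x.length : Int) + (h_.length : Int) - 1).toNat : Nat)) : Int) 1 := by
    have hb : ((x.length : Int) + (h_.length : Int) - 1 - 0).toNat
        = ((((((x.length : Int) + (h_.length : Int) - 1).toNat : Nat)) : Int) - 0).toNat := by
      omega
    rw [PySem.List.pyRange_one, PySem.List.pyRange_one, hb]
  rw [hr]
  rw [pv_gather_getElem
        (fun n => (PySem.List.pyRange 0 (x.length : Int) 1).foldl
          (fun total k => if 0 ≤ n - k ∧ n - k < (h_.length : Int) then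
            total + PySem.List.pyGetD x k 0 * PySem.List.pyGetD h_ (n - k) 0 else total) 0)
        (((x.length : Int) + (h_.length : Int) - 1).toNat) _ i]
  rw [pv_scatter_outer
        (fun k j => PySem.List.pyGetD x k 0 * PySem.List.pyGetD h_ j 0) h_.length x.length _ i]
  have htot := pv_total_eq
        (fun k j => PySem.List.pyGetD x k 0 * PySem.List.pyGetD h_ j 0) h_.length x.length (i : Int)
  by_cases hi : i < ((x.length : Int) + (h_.length : Int) - 1).toNat
  · rw [if_pos (by constructor <;> [omega; simpa using hi])]
    rw [List.getElem?_replicate, if_pos hi]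
    simp only [Option.map_some]
    rw [htot]
    ring_nf
  · rw [if_neg (by simp at hi ⊢; omega)]
    rw [List.getElem?_replicate, if_neg hi]
    rfl
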